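-- pv_equiv track=rewrite | github.com/ethan-campbell/Weddell_phyto_paper | parallel_test.py | operation_without_numpy
-- ===== SOURCE A (Python) =====
-- def operation_without_numpy(input_array):
--     input_array_copy = input_array.copy()
--     sublist1 = [val**4 for val in input_array_copy]
--     sublist2 = [(val+1)**4 for val in input_array_copy]
--     new_list = [sublist1[i] + sublist2[i] for i in range(len(sublist1))]
--     sum = 0
--     for i in range(len(sublist1)): sum += new_list[i]
--     return sum
-- ===== SOURCE B (Python) =====
-- def operation_without_numpy(input_array):
--     input_array_copy = input_array.copy()
--     total = 0
--     for val in input_array_copy: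
--         total += val**4 + (val+1)**4
--     return total
-- ===== Notes on version B (the rewrite author's own statement) =====
-- stated objective: simpler
-- what changed: Replaced the four passes (two list comprehensions, an index-zipped combination list, and a final index loop) with a single pass over the copy keeping one running integer accumulator and no intermediate lists (constant-factor speedup measured).
import Mathlib
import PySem

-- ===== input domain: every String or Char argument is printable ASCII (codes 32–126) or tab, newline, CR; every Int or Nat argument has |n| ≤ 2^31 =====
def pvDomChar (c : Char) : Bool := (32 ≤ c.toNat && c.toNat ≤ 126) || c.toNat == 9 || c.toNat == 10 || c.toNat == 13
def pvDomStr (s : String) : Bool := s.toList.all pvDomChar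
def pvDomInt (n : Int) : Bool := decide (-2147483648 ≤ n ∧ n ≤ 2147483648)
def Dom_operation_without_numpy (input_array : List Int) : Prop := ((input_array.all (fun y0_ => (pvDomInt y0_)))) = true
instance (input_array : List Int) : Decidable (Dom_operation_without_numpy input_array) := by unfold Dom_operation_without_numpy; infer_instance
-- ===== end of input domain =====

-- ===== PORT A =====
def operation_without_numpy (input_array : List Int) : Int :=
  let input_array_copy := input_array
  let sublist1 := input_array_copy.map (fun val => val ^ 4)
  let sublist2 := input_array_copy.map (fun val => (val + 1) ^ 4)
  let new_list := (PySem.List.pyRange 0 sublist1.length 1).map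
    (fun i => PySem.List.pyGetD sublist1 i 0 + PySem.List.pyGetD sublist2 i 0)
  (PySem.List.pyRange 0 sublist1.length 1).foldl
    (fun s i => s + PySem.List.pyGetD new_list i 0) 0

-- ===== PORT B =====
def operation_without_numpy_alt (input_array : List Int) : Int :=
  let input_array_copy := input_array
  input_array_copy.foldl (fun total val => total + (val ^ 4 + (val + 1) ^ 4)) 0

-- ===== PRECONDITION & SPEC =====
def Spec_operation_without_numpy (input_array : List Int) (out : Int) : Prop := out = operation_without_numpy_alt input_array
instance (input_array : List Int) (out : Int) : Decidable (Spec_operation_without_numpy input_array out) := by unfold Spec_operation_without_numpy; infer_instance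

-- ===== CLAIM (what is proved, stated in full; the proofs are below) =====
def Claim_equal_operation_without_numpy : Prop := ∀ (input_array : List Int), Dom_operation_without_numpy input_array → Spec_operation_without_numpy input_array (operation_without_numpy input_array)

-- ===== LEMMAS AND PROOFS =====

lemma pv_new_list_eq (l : List Int) :
    (PySem.List.pyRange 0 l.length 1).map
      (fun i => PySem.List.pyGetD (l.map (fun val => val ^ 4)) i 0 +
                PySem.List.pyGetD (l.map (fun val => (val + 1) ^ 4)) i 0) =
    l.map (fun val => val ^ 4 + (val + 1) ^ 4) := by
  apply List.ext_getElem
  · simp [PySem.List.length_pyRange_one]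
  · intro k h1 h2
    have hk : k < l.length := by
      simpa [PySem.List.length_pyRange_one] using h1
    simp [PySem.List.getElem_pyRange_one, List.getElem_map, hk]

lemma pv_foldl_map (l : List Int) (acc : Int) :
    (l.map (fun val => val ^ 4 + (val + 1) ^ 4)).foldl (fun s x => s + x) acc =
    l.foldl (fun total val => total + (val ^ 4 + (val + 1) ^ 4)) acc := by
  induction l generalizing acc with
  | nil => rfl
  | cons x xs ih => simp [List.foldl, ih]

-- ===== VERDICT (by name: the statement is the Claim_ definition above) =====
theorem operation_without_numpy_spec : Claim_equal_operation_without_numpy := by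
  intro l _
  unfold Spec_operation_without_numpy operation_without_numpy operation_without_numpy_alt
  simp only []
  rw [show ((l.map (fun val => val ^ 4)).length) = l.length by simp]
  rw [pv_new_list_eq l]
  have h := PySem.List.foldl_pyRange_zero_pyGetD
    (l.map (fun val => val ^ 4 + (val + 1) ^ 4)) (0 : Int) (fun s x => s + x) 0
  simp only [PySem.List.len_eq, List.length_map] at h
  rw [h, pv_foldl_map]
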